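-- pv_equiv track=rewrite | github.com/spandanx/youtube-comment-analysis-app-python | DataProcessing/SentenceCleanser.py | clean_square_brackets
-- ===== SOURCE A (Python) =====
-- def clean_square_brackets(text):
--     cleaned_text = ""
--     inside_bracket = False
--     for character in text:
--         if character == "[":
--             inside_bracket = True
--         if not inside_bracket:
--             cleaned_text += character
--         if character == "]":
--             inside_bracket = False
--     return cleaned_text
-- ===== SOURCE B (Python) =====
-- def clean_square_brackets(text):
--     parts = []
--     i = 0
--     while True:
--         j = text.find('[', i)
--         if j == -1:
--             parts.append(text[i:])
--             break
--         parts.append(text[i:j])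
--         k = text.find(']', j)
--         if k == -1:
--             break
--         i = k + 1
--     return ''.join(parts)
-- ===== Notes on version B (the rewrite author's own statement) =====
-- stated objective: faster
-- what changed: Replaced the per-character boolean state machine (with quadratic string concatenation) by an index-based segment collector: repeatedly find the next '[' and the ']' after it, collect the slices between bracketed regions, and join them.
import Mathlib
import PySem

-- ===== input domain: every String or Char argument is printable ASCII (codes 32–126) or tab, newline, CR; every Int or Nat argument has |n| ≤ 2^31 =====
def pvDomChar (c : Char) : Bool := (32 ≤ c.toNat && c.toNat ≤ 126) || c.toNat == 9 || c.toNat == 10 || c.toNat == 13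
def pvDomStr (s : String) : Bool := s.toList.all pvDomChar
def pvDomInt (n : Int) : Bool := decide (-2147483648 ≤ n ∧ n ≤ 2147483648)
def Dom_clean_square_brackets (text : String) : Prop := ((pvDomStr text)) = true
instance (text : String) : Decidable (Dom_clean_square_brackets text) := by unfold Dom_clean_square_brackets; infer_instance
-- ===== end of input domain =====

-- B replaces A's per-character boolean state machine by an index-based segment collector
-- (find the next '[' and the ']' after it, keeping the text between bracketed regions);
-- equivalence of the return values is proved for all strings (both programs are total).

-- ===== PORT A =====
-- per-character loop; state = (cleaned_text as a list of chars, inside_bracket flag)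
def pvStepA (acc : List Char × Bool) (c : Char) : List Char × Bool :=
  let inside := if c = '[' then true else acc.2
  let out := if inside = false then acc.1 ++ [c] else acc.1
  let inside := if c = ']' then false else inside
  (out, inside)

def clean_square_brackets (text : String) : String :=
  String.ofList (text.toList.foldl pvStepA ([], false)).1

-- ===== PORT B =====
-- segment collector over the character list: pre = text[i:j] (chars up to the next '[',
-- via takeWhile ~ find('[', i)); if there is no '[' keep the rest and stop; otherwise skip
-- to the ']' after it (dropWhile ~ find(']', j)); if there is none, stop (dropping the
-- remainder); else continue after it.  ''.join(parts) is the accumulated appends.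
def pvGoB (cs : List Char) : List Char :=
  let pre := cs.takeWhile (· ≠ '[')
  match h : cs.dropWhile (· ≠ '[') with
  | [] => pre
  | _ :: r =>
    match h2 : r.dropWhile (· ≠ ']') with
    | [] => pre
    | _ :: tail => pre ++ pvGoB tail
termination_by cs.length
decreasing_by
  have h1 : (cs.dropWhile (· ≠ '[')).length ≤ cs.length := cs.length_dropWhile_le _
  have h3 : (r.dropWhile (· ≠ ']')).length ≤ r.length := r.length_dropWhile_le _
  rw [h] at h1; rw [h2] at h3; simp at h1 h3; omega

def clean_square_brackets_alt (text : String) : String :=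
  String.ofList (pvGoB text.toList)

-- ===== PRECONDITION & SPEC =====
def Spec_clean_square_brackets (text : String) (out : String) : Prop := out = clean_square_brackets_alt text
instance (text : String) (out : String) : Decidable (Spec_clean_square_brackets text out) := by unfold Spec_clean_square_brackets; infer_instance

-- ===== CLAIM (what is proved, stated in full; the proofs are below) =====
def Claim_equal_clean_square_brackets : Prop := ∀ (text : String), Dom_clean_square_brackets text → Spec_clean_square_brackets text (clean_square_brackets text)

-- ===== LEMMAS AND PROOFS =====

-- branch equations for pvGoB (its match carries named scrutinee hypotheses, so we split)
lemma pvGoB_nil (cs : List Char) (h : cs.dropWhile (· ≠ '[') = []) :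
    pvGoB cs = cs.takeWhile (· ≠ '[') := by
  rw [pvGoB.eq_def]
  split
  · rfl
  · next heq => rw [h] at heq; cases heq

lemma pvGoB_noClose (cs : List Char) (b : Char) (r : List Char)
    (h : cs.dropWhile (· ≠ '[') = b :: r) (h2 : r.dropWhile (· ≠ ']') = []) :
    pvGoB cs = cs.takeWhile (· ≠ '[') := by
  rw [pvGoB.eq_def]
  split
  · rfl
  · next head r0 heq =>
    rw [h] at heq; injection heq with _ hr; subst hr
    split
    · rfl
    · next heq2 => rw [h2] at heq2; cases heq2

lemma pvGoB_step (cs : List Char) (b d : Char) (r tail : List Char)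
    (h : cs.dropWhile (· ≠ '[') = b :: r) (h2 : r.dropWhile (· ≠ ']') = d :: tail) :
    pvGoB cs = cs.takeWhile (· ≠ '[') ++ pvGoB tail := by
  rw [pvGoB.eq_def]
  split
  · next heq => rw [h] at heq; cases heq
  · next head r0 heq =>
    rw [h] at heq; injection heq with _ hr; subst hr
    split
    · next heq2 => rw [h2] at heq2; cases heq2
    · next d0 t0 heq2 =>
      rw [h2] at heq2; injection heq2 with _ ht; subst ht; rfl

-- over a '['-free prefix, A copies every character and stays outside brackets
lemma foldA_outside (cs : List Char) (acc : List Char)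
    (h : ∀ c ∈ cs, c ≠ '[') :
    cs.foldl pvStepA (acc, false) = (acc ++ cs, false) := by
  induction cs generalizing acc with
  | nil => simp
  | cons c cs ih =>
    have hc : c ≠ '[' := h c (by simp)
    have hrest : ∀ x ∈ cs, x ≠ '[' := fun x hx => h x (by simp [hx])
    by_cases hc2 : c = ']' <;> simp [pvStepA, hc, hc2, ih _ hrest]

-- over a ']'-free segment, A inside brackets drops every character
lemma foldA_inside (cs : List Char) (s : List Char)
    (h : ∀ c ∈ cs, c ≠ ']') :
    cs.foldl pvStepA (s, true) = (s, true) := by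
  induction cs with
  | nil => simp
  | cons c cs ih =>
    have hc : c ≠ ']' := h c (by simp)
    have hrest : ∀ x ∈ cs, x ≠ ']' := fun x hx => h x (by simp [hx])
    by_cases hc2 : c = '[' <;> simp [pvStepA, hc, hc2, ih hrest]

-- the first element after dropWhile falsifies the predicate
lemma pvDropWhile_head_false {p : Char → Bool} {l : List Char} {b : Char} {r : List Char}
    (h : l.dropWhile p = b :: r) : p b = false := by
  induction l with
  | nil => simp at h
  | cons c t ih =>
    by_cases hc : p c
    · rw [List.dropWhile_cons_of_pos hc] at h; exact ih h
    · rw [List.dropWhile_cons_of_neg hc] at h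
      injection h with h1 _; rw [← h1]; simpa using hc

-- main invariant: A's loop started outside brackets produces acc ++ (B's segment result)
lemma foldA_eq_goB (cs : List Char) (acc : List Char) :
    (cs.foldl pvStepA (acc, false)).1 = acc ++ pvGoB cs := by
  have hsplit := List.takeWhile_append_dropWhile (p := (· ≠ '[')) (l := cs)
  have hpre : ∀ c ∈ cs.takeWhile (· ≠ '['), c ≠ '[' := by
    intro c hc
    have := List.mem_takeWhile_imp hc
    simpa using this
  match h : cs.dropWhile (· ≠ '[') with
  | [] =>
    rw [pvGoB_nil cs h]
    conv_lhs => rw [← hsplit, h]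
    rw [List.append_nil, foldA_outside _ _ hpre]
  | b :: r =>
    have hb : b = '[' := by
      have := pvDropWhile_head_false h
      simpa using this
    have hr1 : ∀ c ∈ r.takeWhile (· ≠ ']'), c ≠ ']' := by
      intro c hc; have := List.mem_takeWhile_imp hc; simpa using this
    have hrsplit := List.takeWhile_append_dropWhile (p := (· ≠ ']')) (l := r)
    have hstep : pvStepA (acc ++ cs.takeWhile (· ≠ '['), false) '[' =
        (acc ++ cs.takeWhile (· ≠ '['), true) := by simp [pvStepA]
    match h2 : r.dropWhile (· ≠ ']') with
    | [] =>
      rw [pvGoB_noClose cs b r h h2]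
      conv_lhs => rw [← hsplit, h]
      rw [List.foldl_append, foldA_outside _ _ hpre]
      simp only [List.foldl_cons, hb, hstep]
      conv_lhs => rw [← hrsplit, h2]
      rw [List.append_nil, foldA_inside _ _ hr1]
    | d :: tail =>
      have hd : d = ']' := by
        have := pvDropWhile_head_false h2
        simpa using this
      have hstep2 : pvStepA (acc ++ cs.takeWhile (· ≠ '['), true) ']' =
          (acc ++ cs.takeWhile (· ≠ '['), false) := by simp [pvStepA]
      rw [pvGoB_step cs b d r tail h h2]
      conv_lhs => rw [← hsplit, h]
      rw [List.foldl_append, foldA_outside _ _ hpre]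
      simp only [List.foldl_cons, hb, hstep]
      conv_lhs => rw [← hrsplit, h2]
      rw [List.foldl_append, foldA_inside _ _ hr1]
      simp only [List.foldl_cons, hd, hstep2]
      rw [foldA_eq_goB tail (acc ++ cs.takeWhile (· ≠ '['))]
      simp
termination_by cs.length
decreasing_by
  have h1 : (cs.dropWhile (· ≠ '[')).length ≤ cs.length := cs.length_dropWhile_le _
  have h3 : (r.dropWhile (· ≠ ']')).length ≤ r.length := r.length_dropWhile_le _
  rw [h] at h1; rw [h2] at h3; simp at h1 h3; omega

-- ===== VERDICT (by name: the statement is the Claim_ definition above) =====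
theorem clean_square_brackets_spec : Claim_equal_clean_square_brackets := by
  intro text _
  unfold Spec_clean_square_brackets clean_square_brackets clean_square_brackets_alt
  rw [foldA_eq_goB]
  simp
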